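-- pv_equiv track=rewrite | github.com/eugene-mindset/HopHacksFa19 | anthrominor.py | check_anthro_minor
-- ===== SOURCE A (Python) =====
-- def check_anthro_minor(student_courses):
--     courses_left = []
--     if 'AS.070.132' not in student_courses:
--         courses_left.append('AS.070.132 - Invitation to Anthropology')
--     if 'AS.070.273' not in student_courses:
--         courses_left.append('AS.070.273 - Ethnographies')
--     if 'AS.070.317' not in student_courses:
--         courses_left.append('AS.070.317 - Methods')
--     if 'AS.070.419' not in student_courses:
--         courses_left.append('Logic of Anthropological Inquiry')
--
--     anthro_uppers = [course for course in student_courses if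
--         course.startswith('AS.070.3') or course.startswith('AS.070.4')]
--
--     if (len(anthro_uppers) < 2):
--         for i in range (2 - len(anthro_uppers)):
--             courses_left.append('Anthropology course at either the 300 or 400 level')
--
--     others = False
--
--     for course in student_courses:
--         if course not in anthro_uppers and course.startswith('AS.070.'):
--             others = True
--
--     if not others:
--         courses_left.append('Anthropology course at any level')
--
--     return courses_left
-- ===== SOURCE B (Python) =====
-- _REQUIRED = [
--     ('AS.070.132', 'AS.070.132 - Invitation to Anthropology'),
--     ('AS.070.273', 'AS.070.273 - Ethnographies'),
--     ('AS.070.317', 'AS.070.317 - Methods'),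
--     ('AS.070.419', 'Logic of Anthropological Inquiry'),
-- ]
-- _CODES = [code for code, _ in _REQUIRED]
--
--
-- def check_anthro_minor(student_courses):
--     seen = set()
--     upper = 0
--     lower = False
--     for c in student_courses:
--         if c in _CODES:
--             seen.add(c)
--         if c.startswith('AS.070.3') or c.startswith('AS.070.4'):
--             upper += 1
--         elif c.startswith('AS.070.'):
--             lower = True
--     out = [desc for code, desc in _REQUIRED if code not in seen]
--     out.extend(['Anthropology course at either the 300 or 400 level'] * max(0, 2 - upper))
--     if not lower:
--         out.append('Anthropology course at any level')
--     return out
-- ===== Notes on version B (the rewrite author's own statement) =====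
-- stated objective: simpler
-- what changed: B replaces A's three separate traversals (four membership scans, an upper-level filter, and an 'others' loop over the full list) by one single pass that maintains the set of seen required codes, an upper-level counter and a lower-level flag, then assembles the output from that state.
import Mathlib
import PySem

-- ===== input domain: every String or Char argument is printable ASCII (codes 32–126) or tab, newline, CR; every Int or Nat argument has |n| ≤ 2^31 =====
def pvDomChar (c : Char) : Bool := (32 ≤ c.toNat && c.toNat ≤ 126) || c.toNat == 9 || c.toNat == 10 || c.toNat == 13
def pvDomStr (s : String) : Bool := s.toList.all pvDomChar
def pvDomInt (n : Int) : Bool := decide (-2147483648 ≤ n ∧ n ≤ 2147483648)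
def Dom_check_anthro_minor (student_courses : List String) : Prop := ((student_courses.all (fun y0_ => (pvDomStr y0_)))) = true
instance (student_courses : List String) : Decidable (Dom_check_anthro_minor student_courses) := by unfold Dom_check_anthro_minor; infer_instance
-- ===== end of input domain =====

-- B replaces A's three separate scans (four membership tests, a filter, and an 'others' loop)
-- by ONE traversal maintaining (seen required codes, upper-level count, lower-level flag); objective: simpler one-pass decomposition.

-- ===== PORT A =====
def check_anthro_minor (student_courses : List String) : List String :=
  let courses_left : List String := []
  let courses_left := if "AS.070.132" ∈ student_courses then courses_left
    else courses_left ++ ["AS.070.132 - Invitation to Anthropology"]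
  let courses_left := if "AS.070.273" ∈ student_courses then courses_left
    else courses_left ++ ["AS.070.273 - Ethnographies"]
  let courses_left := if "AS.070.317" ∈ student_courses then courses_left
    else courses_left ++ ["AS.070.317 - Methods"]
  let courses_left := if "AS.070.419" ∈ student_courses then courses_left
    else courses_left ++ ["Logic of Anthropological Inquiry"]
  let anthro_uppers := student_courses.filter (fun course =>
    PySem.Str.startswith course "AS.070.3" || PySem.Str.startswith course "AS.070.4")
  let courses_left := if anthro_uppers.length < 2 then
      (PySem.List.pyRange 0 (2 - (anthro_uppers.length : Int)) 1).foldl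
        (fun acc _ => acc ++ ["Anthropology course at either the 300 or 400 level"]) courses_left
    else courses_left
  let others := student_courses.foldl (fun others course =>
      if !(anthro_uppers.contains course) && PySem.Str.startswith course "AS.070." then true
      else others) false
  if !others then courses_left ++ ["Anthropology course at any level"] else courses_left

-- ===== PORT B =====
def pvRequired : List (String × String) :=
  [("AS.070.132", "AS.070.132 - Invitation to Anthropology"),
   ("AS.070.273", "AS.070.273 - Ethnographies"),
   ("AS.070.317", "AS.070.317 - Methods"),
   ("AS.070.419", "Logic of Anthropological Inquiry")]

def pvCodes : List String := pvRequired.map (fun p => p.1)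

def pvUp (c : String) : Bool :=
  PySem.Str.startswith c "AS.070.3" || PySem.Str.startswith c "AS.070.4"

-- the single-pass body of B's loop
def pvStep (st : PySem.Set String × Int × Bool) (c : String) : PySem.Set String × Int × Bool :=
  let seen := if pvCodes.contains c then PySem.Set.add st.1 c else st.1
  if pvUp c then
    (seen, st.2.1 + 1, st.2.2)
  else if PySem.Str.startswith c "AS.070." then (seen, st.2.1, true)
  else (seen, st.2.1, st.2.2)

def check_anthro_minor_alt (student_courses : List String) : List String :=
  let st := student_courses.foldl pvStep (PySem.Set.empty, 0, false)
  let out := (pvRequired.filter (fun p => !(PySem.Set.contains st.1 p.1))).map (fun p => p.2)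
  let out := out ++ List.replicate (max 0 (2 - st.2.1)).toNat
      "Anthropology course at either the 300 or 400 level"
  if !st.2.2 then out ++ ["Anthropology course at any level"] else out

-- ===== PRECONDITION & SPEC =====
def Spec_check_anthro_minor (student_courses : List String) (out : List String) : Prop := out = check_anthro_minor_alt student_courses
instance (student_courses : List String) (out : List String) : Decidable (Spec_check_anthro_minor student_courses out) := by unfold Spec_check_anthro_minor; infer_instance

-- ===== CLAIM (what is proved, stated in full; the proofs are below) =====
def Claim_equal_check_anthro_minor : Prop := ∀ (student_courses : List String), Dom_check_anthro_minor student_courses → Spec_check_anthro_minor student_courses (check_anthro_minor student_courses)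

-- ===== LEMMAS AND PROOFS =====

def pvLow (c : String) : Bool := !(pvUp c) && PySem.Str.startswith c "AS.070."

-- characterisation of B's single-pass fold
lemma pvStep_foldl (l : List String) (s : PySem.Set String) (u : Int) (b : Bool) :
    (l.foldl pvStep (s, u, b)).2.1 = u + (l.countP pvUp : Int)
    ∧ (l.foldl pvStep (s, u, b)).2.2 = (b || l.any pvLow)
    ∧ ∀ x, (x ∈ (l.foldl pvStep (s, u, b)).1 ↔ x ∈ s ∨ (x ∈ l ∧ x ∈ pvCodes)) := by
  induction l generalizing s u b with
  | nil => simp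
  | cons c l ih =>
    have hstep : ∃ s' : PySem.Set String,
        (pvStep (s, u, b) c
          = (s', u + (if pvUp c = true then 1 else 0),
             b || pvLow c))
        ∧ (∀ x, x ∈ s' ↔ x ∈ s ∨ (x = c ∧ c ∈ pvCodes)) := by
      refine ⟨(pvStep (s, u, b) c).1, ?_, ?_⟩
      · simp only [pvStep, pvLow]
        by_cases hu : pvUp c = true
        · rw [hu]; simp
        · simp only [Bool.not_eq_true] at hu
          by_cases hs : PySem.Str.startswith c "AS.070." = true
          · rw [hu, hs]; simp
          · simp only [Bool.not_eq_true] at hs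
            rw [hu, hs]; simp
      · intro x
        have h1st : (pvStep (s, u, b) c).1
            = (if pvCodes.contains c = true then PySem.Set.add s c else s) := by
          simp only [pvStep]
          split
          · rfl
          · split <;> rfl
        rw [h1st]
        by_cases hc : pvCodes.contains c = true
        · have hc' : c ∈ pvCodes := List.mem_of_elem_eq_true hc
          simp only [hc, if_true, PySem.Set.mem_add, hc', and_true]
        · have hc' : c ∉ pvCodes := fun h => hc (List.elem_eq_true_of_mem h)
          simp only [Bool.not_eq_true] at hc
          simp [hc']
    obtain ⟨s', hst, hmem⟩ := hstep
    simp only [List.foldl_cons, hst, List.countP_cons, List.any_cons]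
    obtain ⟨h1, h2, h3⟩ := ih s' (u + (if pvUp c = true then 1 else 0)) (b || pvLow c)
    refine ⟨?_, ?_, ?_⟩
    · rw [h1]; push_cast; split <;> ring
    · rw [h2, Bool.or_assoc]
    · intro x
      rw [h3 x]
      simp only [hmem x, List.mem_cons]
      constructor
      · rintro ((h | ⟨rfl, h⟩) | ⟨h, h'⟩)
        · exact Or.inl h
        · exact Or.inr ⟨Or.inl rfl, h⟩
        · exact Or.inr ⟨Or.inr h, h'⟩
      · rintro (h | ⟨(rfl | h), h'⟩)
        · exact Or.inl (Or.inl h)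
        · exact Or.inl (Or.inr ⟨rfl, h'⟩)
        · exact Or.inr ⟨h, h'⟩

-- A's range-append loop is a replicate
lemma pvRange_append (k : Int) (acc : List String) (x : String) :
    (PySem.List.pyRange 0 k 1).foldl (fun acc _ => acc ++ [x]) acc
      = acc ++ List.replicate k.toNat x := by
  rw [PySem.List.foldl_append_singleton_eq_map]
  congr 1
  rw [List.eq_replicate_iff]
  constructor
  · simp [PySem.List.length_pyRange_one]
  · simp

-- the replicate counts agree
lemma pvReplicate_count (n : Nat) (acc : List String) (x : String) :
    (if n < 2 then acc ++ List.replicate ((2 - (n : Int)).toNat) x else acc)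
      = acc ++ List.replicate (max 0 (2 - (n : Int))).toNat x := by
  by_cases h : n < 2
  · simp only [h, if_true]
    congr 2
    omega
  · simp only [h, if_false]
    have : (max 0 (2 - (n : Int))).toNat = 0 := by omega
    simp [this]

-- ===== VERDICT (by name: the statement is the Claim_ definition above) =====
theorem check_anthro_minor_spec : Claim_equal_check_anthro_minor := by
  intro l _
  unfold Spec_check_anthro_minor check_anthro_minor check_anthro_minor_alt
  obtain ⟨h1, h2, h3⟩ := pvStep_foldl l PySem.Set.empty 0 false
  simp only [h1, h2]
  -- the 'others' loop computes l.any pvLow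
  have hothers : l.foldl (fun others course =>
      if !((l.filter (fun course =>
        PySem.Str.startswith course "AS.070.3" || PySem.Str.startswith course "AS.070.4")).contains course)
        && PySem.Str.startswith course "AS.070." then true else others) false = l.any pvLow := by
    rw [PySem.List.foldl_if_true_eq]
    simp only [Bool.false_or]
    apply PySem.List.any_congr_mem
    intro c hcl
    by_cases hu : pvUp c = true
    · have hmemf : (l.filter (fun course =>
          PySem.Str.startswith course "AS.070.3" || PySem.Str.startswith course "AS.070.4")).contains c = true :=
        List.elem_eq_true_of_mem (List.mem_filter.mpr ⟨hcl, hu⟩)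
      rw [pvLow, hmemf, hu]
    · have hnot : c ∉ l.filter (fun course =>
          PySem.Str.startswith course "AS.070.3" || PySem.Str.startswith course "AS.070.4") :=
        fun h => hu ((List.mem_filter.mp h).2)
      have hmemf : (l.filter (fun course =>
          PySem.Str.startswith course "AS.070.3" || PySem.Str.startswith course "AS.070.4")).contains c = false := by
        rw [Bool.eq_false_iff]
        exact fun h => hnot (List.mem_of_elem_eq_true h)
      simp only [Bool.not_eq_true] at hu
      rw [pvLow, hmemf, hu]
  rw [hothers]
  -- the filter length is the countP
  have hlen : (l.filter (fun course =>
      PySem.Str.startswith course "AS.070.3" || PySem.Str.startswith course "AS.070.4")).length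
      = l.countP pvUp := Eq.symm List.countP_eq_length_filter
  rw [hlen]
  rw [pvRange_append, pvReplicate_count]
  -- the required-courses prefix
  have hmem : ∀ code : String, code ∈ pvCodes →
      (PySem.Set.contains (l.foldl pvStep (PySem.Set.empty, 0, false)).1 code = decide (code ∈ l)) := by
    intro code hcode
    by_cases hcl : code ∈ l
    · have hin : code ∈ (l.foldl pvStep (PySem.Set.empty, 0, false)).1 := by
        rw [h3 code]
        exact Or.inr ⟨hcl, hcode⟩
      rw [(PySem.Set.contains_iff _ _).mpr hin]
      simp [hcl]
    · have hnin : code ∉ (l.foldl pvStep (PySem.Set.empty, 0, false)).1 := by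
        rw [h3 code]
        rintro (h | ⟨h, _⟩)
        · simp [PySem.Set.empty] at h
        · exact hcl h
      have : (l.foldl pvStep (PySem.Set.empty, 0, false)).1.contains code = false := by
        rw [Bool.eq_false_iff]
        exact fun h => hnin ((PySem.Set.contains_iff _ _).mp h)
      rw [this]
      simp [hcl]
  have hm132 := hmem "AS.070.132" (by decide)
  have hm273 := hmem "AS.070.273" (by decide)
  have hm317 := hmem "AS.070.317" (by decide)
  have hm419 := hmem "AS.070.419" (by decide)
  simp only [pvRequired, List.filter, hm132, hm273, hm317, hm419]
  by_cases h132 : "AS.070.132" ∈ l <;> by_cases h273 : "AS.070.273" ∈ l <;>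
    by_cases h317 : "AS.070.317" ∈ l <;> by_cases h419 : "AS.070.419" ∈ l <;>
    by_cases hany : l.any pvLow = true <;>
    simp [h132, h273, h317, h419, hany]
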